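-- pv_equiv track=rewrite | github.com/Cloudwith-mo/omega-fx-v2 | scripts/run_fastpass_usdjpy_live.py | _parse_comment_strategy
-- ===== SOURCE A (Python) =====
-- from typing import Dict, List, Optional, Tuple
--
-- def _parse_comment_strategy(comment: str) -> Optional[str]:
--     if not comment:
--         return None
--     if "strategy=" in comment:
--         for part in comment.split("|"):
--             if part.startswith("strategy="):
--                 return part.split("=", 1)[1].strip() or None
--     if "EDGE=" in comment:
--         for part in comment.split("|"):
--             if part.startswith("EDGE="):
--                 return part.split("=", 1)[1].strip() or None
--     return None
-- ===== SOURCE B (Python) =====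
-- def _parse_comment_strategy(comment):
--     d = {}
--     for part in comment.split("|"):
--         if "=" in part:
--             k, v = part.split("=", 1)
--             if k not in d:
--                 d[k] = v
--     for key in ("strategy", "EDGE"):
--         if key in d:
--             return d[key].strip() or None
--     return None
-- ===== Notes on version B (the rewrite author's own statement) =====
-- stated objective: simpler
-- what changed: Replaces A's two substring-guarded rescans of the parts with a single pass that builds a first-occurrence key/value dict and then looks up 'strategy' and 'EDGE' by key membership.
import Mathlib
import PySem

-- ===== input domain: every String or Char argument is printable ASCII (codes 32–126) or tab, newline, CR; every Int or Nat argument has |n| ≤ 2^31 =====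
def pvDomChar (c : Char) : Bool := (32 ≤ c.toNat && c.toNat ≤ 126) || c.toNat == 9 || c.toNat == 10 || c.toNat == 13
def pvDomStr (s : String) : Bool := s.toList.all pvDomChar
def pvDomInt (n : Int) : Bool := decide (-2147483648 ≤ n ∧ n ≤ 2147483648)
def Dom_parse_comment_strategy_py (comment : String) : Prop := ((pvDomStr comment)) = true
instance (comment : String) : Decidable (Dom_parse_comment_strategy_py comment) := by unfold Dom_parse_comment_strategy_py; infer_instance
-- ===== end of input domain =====

-- B replaces A's two substring-guarded rescans of the parts with one pass building a
-- first-occurrence key/value dict followed by key lookups (objective: simpler).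

-- ===== PORT A =====
-- comment.split("|"): the separator is the nonempty literal "|", so Str.split? is always `some`
def pvSplitBar (s : String) : List String := (PySem.Str.split? s "|").getD []

-- the body of A's inner loops: scan the parts for the first one starting with `pre`
-- ("strategy=" or "EDGE="); `some r` = the loop executed `return r`, `none` = it fell through
def pvScanA (pre : String) : List String → Option (Option String)
  | [] => none
  | p :: rest =>
    if PySem.Str.startswith p pre then
      -- return part.split("=", 1)[1].strip() or None
      some (match (PySem.Str.splitMax? p "=" 1).bind
              (fun pieces => PySem.List.pyGet? pieces 1) with
            | some v => if PySem.Str.strip v = "" then none else some (PySem.Str.strip v)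
            | none => none)  -- IndexError: unreachable, `pre` ends in '=' so p contains '='
    else pvScanA pre rest

def parse_comment_strategy_py (comment : String) : Option String :=
  if comment = "" then none
  else
    match (if PySem.Str.isIn "strategy=" comment then
             pvScanA "strategy=" (pvSplitBar comment) else none) with
    | some r => r
    | none =>
      match (if PySem.Str.isIn "EDGE=" comment then
               pvScanA "EDGE=" (pvSplitBar comment) else none) with
      | some r => r
      | none => none

-- ===== PORT B =====
-- one step of B's first loop: record part's key/value on first occurrence of the key
def pvInsertPart (d : PySem.Dict String String) (p : String) : PySem.Dict String String :=
  if PySem.Str.isIn "=" p then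
    match PySem.Str.splitMax? p "=" 1 with
    | some [k, v] => if d.contains k then d else d.insert k v
    | _ => d  -- unreachable: split("=", 1) with '=' present yields exactly two pieces
  else d

-- B's second loop: for key in ("strategy", "EDGE"): if key in d: return d[key].strip() or None
def pvLookup (d : PySem.Dict String String) : List String → Option String
  | [] => none
  | k :: ks =>
    match d.get? k with
    | some v => if PySem.Str.strip v = "" then none else some (PySem.Str.strip v)
    | none => pvLookup d ks

def parse_comment_strategy_py_alt (comment : String) : Option String :=
  pvLookup ((pvSplitBar comment).foldl pvInsertPart PySem.Dict.empty) ["strategy", "EDGE"]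

-- ===== PRECONDITION & SPEC =====
def Spec_parse_comment_strategy_py (comment : String) (out : Option String) : Prop := out = parse_comment_strategy_py_alt comment
instance (comment : String) (out : Option String) : Decidable (Spec_parse_comment_strategy_py comment out) := by unfold Spec_parse_comment_strategy_py; infer_instance

-- ===== CLAIM (what is proved, stated in full; the proofs are below) =====
def Claim_equal_parse_comment_strategy_py : Prop := ∀ (comment : String), Dom_parse_comment_strategy_py comment → Spec_parse_comment_strategy_py comment (parse_comment_strategy_py comment)

-- ===== LEMMAS AND PROOFS =====

-- every part produced by split is an infix of the source string
theorem pv_go_infix (sep : List Char) (fuel : Nat) :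
    ∀ (l cur : List Char) (acc : List (List Char)) (p : List Char),
      p ∈ PySem.Chars.splitOn.go sep fuel l cur acc →
      p ∈ acc ∨ (∃ t, t <+: l ∧ p = cur.reverse ++ t) ∨ p <:+: l := by
  induction fuel with
  | zero =>
    intro l cur acc p h
    rw [PySem.Chars.splitOn.go] at h
    simp at h
    rcases h with h | h
    · exact Or.inl h
    · exact Or.inr (Or.inl ⟨l, List.prefix_refl l, h⟩)
  | succ f ih =>
    intro l cur acc p h
    match l with
    | [] =>
      rw [PySem.Chars.splitOn.go] at h
      simp at h
      rcases h with h | h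
      · exact Or.inl h
      · exact Or.inr (Or.inl ⟨[], by simp, by simp [h]⟩)
      omega
    | c :: rest =>
      rw [PySem.Chars.splitOn.go] at h
      by_cases hp : sep.isPrefixOf (c :: rest) = true
      · simp only [hp, if_pos] at h
        rcases ih _ _ _ _ h with h | h | h
        · simp only [List.mem_cons] at h
          rcases h with h | h
          · exact Or.inr (Or.inl ⟨[], by simp, by simp [h]⟩)
          · exact Or.inl h
        · rcases h with ⟨t, ht, hp'⟩
          refine Or.inr (Or.inr ?_)
          simp at hp'
          subst hp'
          exact (ht.isInfix).trans (List.drop_suffix _ _).isInfix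
        · exact Or.inr (Or.inr (h.trans (List.drop_suffix _ _).isInfix))
      · simp only [hp, if_false] at h
        rcases ih _ _ _ _ h with h | h | h
        · exact Or.inl h
        · rcases h with ⟨t, ht, hp'⟩
          exact Or.inr (Or.inl ⟨c :: t, by simpa using ht, by simp [hp']⟩)
        · exact Or.inr (Or.inr (h.trans (List.suffix_cons c rest).isInfix))

theorem pv_mem_splitOn_infix (s sep p : List Char) (h : p ∈ PySem.Chars.splitOn s sep) :
    p <:+: s := by
  rw [PySem.Chars.splitOn] at h
  rcases pv_go_infix sep (s.length + 1) s [] [] p h with h | h | h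
  · simp at h
  · rcases h with ⟨t, ht, hp⟩
    simp at hp; subst hp; exact ht.isInfix
  · exact h

theorem pv_go_split0 (fuel : Nat) (l cur : List Char) (acc : List (List Char)) :
    PySem.Chars.splitOnMax.go ['='] fuel 0 l cur acc = ((cur.reverse ++ l) :: acc).reverse := by
  match fuel, l with
  | 0, l => rw [PySem.Chars.splitOnMax.go]
  | f + 1, [] => rw [PySem.Chars.splitOnMax.go] <;> simp
  | f + 1, c :: rest => rw [PySem.Chars.splitOnMax.go]; simp

theorem pv_go_split1 (fuel : Nat) :
    ∀ (l cur : List Char) (acc : List (List Char)), l.length < fuel →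
      PySem.Chars.splitOnMax.go ['='] fuel 1 l cur acc =
        if '=' ∈ l then
          acc.reverse ++ [cur.reverse ++ l.takeWhile (· ≠ '='), (l.dropWhile (· ≠ '=')).tail]
        else ((cur.reverse ++ l) :: acc).reverse := by
  induction fuel with
  | zero => intro l cur acc h; omega
  | succ f ih =>
    intro l cur acc h
    match l with
    | [] =>
      rw [PySem.Chars.splitOnMax.go]
      · simp
      omega
    | c :: rest =>
      rw [PySem.Chars.splitOnMax.go]
      by_cases hc : c = '='
      · subst hc
        have hp : List.isPrefixOf ['='] ('=' :: rest) = true := by simp [List.isPrefixOf]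
        simp only [hp, if_pos]
        rw [pv_go_split0]
        simp [List.takeWhile, List.dropWhile]
      · have hc' : ¬ '=' = c := fun e => hc e.symm
        have hp : List.isPrefixOf ['='] (c :: rest) = false := by
          simp [List.isPrefixOf, hc']
        simp only [hp, if_false]
        rw [ih rest (c :: cur) acc (by simpa using Nat.lt_of_succ_lt_succ h)]
        by_cases hm : '=' ∈ rest
        · simp [hm, hc, hc', List.takeWhile, List.dropWhile]
        · simp [hm, hc, hc', List.takeWhile, List.dropWhile]

theorem pv_split1_mem (l : List Char) (h : '=' ∈ l) :
    PySem.Chars.splitOnMax l ['='] 1 = [l.takeWhile (· ≠ '='), (l.dropWhile (· ≠ '=')).tail] := by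
  rw [PySem.Chars.splitOnMax]
  simp only [if_neg (by omega : ¬ (1 : Int) < 0), Int.toNat_one]
  rw [pv_go_split1 (l.length + 1) l [] [] (by omega)]
  simp [h]

theorem pv_prefix_iff_takeWhile (l key : List Char) (hl : '=' ∈ l) (hk : '=' ∉ key) :
    ((key ++ ['=']) <+: l) ↔ l.takeWhile (· ≠ '=') = key := by
  induction l generalizing key with
  | nil => simp at hl
  | cons c rest ih =>
    match key with
    | [] =>
      by_cases hc : c = '='
      · subst hc; simp [List.takeWhile]
      · simp [List.takeWhile, hc, List.cons_prefix_cons, Ne.symm hc]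
    | d :: key' =>
      have hd : d ≠ '=' := fun e => hk (by simp [e])
      by_cases hc : c = '='
      · subst hc
        simp [List.takeWhile, List.cons_prefix_cons, Ne.symm hd, hd]
      · have hm : '=' ∈ rest := (List.mem_cons.mp hl).resolve_left (Ne.symm hc)
        have := ih hm (key := key') (fun hmem => hk (by simp [hmem]))
        simp [List.takeWhile, hc, List.cons_prefix_cons, this, eq_comm]

theorem pv_startswith_mem (p pre : String) (h : PySem.Str.startswith p pre = true)
    (h' : '=' ∈ pre.toList) : '=' ∈ p.toList := by
  have := (PySem.Chars.startswith_iff p.toList pre.toList).mp (by simpa using h)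
  exact this.mem h'

-- A's scan loop is find? over the startswith predicate
theorem pv_scanA_eq (pre : String) (parts : List String) :
    pvScanA pre parts =
      (parts.find? (fun p => PySem.Str.startswith p pre)).map
        (fun p => match (PySem.Str.splitMax? p "=" 1).bind
                    (fun pieces => PySem.List.pyGet? pieces 1) with
                  | some v => if PySem.Str.strip v = "" then none else some (PySem.Str.strip v)
                  | none => none) := by
  induction parts with
  | nil => rfl
  | cons p rest ih =>
    rw [pvScanA, List.find?]
    by_cases hp : PySem.Str.startswith p pre = true
    · rw [PySem.Str.startswith_eq] at hp
      simp [hp]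
    · simp only [Bool.not_eq_true] at hp
      rw [PySem.Str.startswith_eq] at hp
      simp [hp, ih]

-- the value B stores for a part (the piece after the first '=')
def pvVal (p : String) : String := String.ofList ((p.toList.dropWhile (· ≠ '=')).tail)

-- startswith (key ++ "=") pins down the segment of p before its first '='
theorem pv_sw_iff (p key : String) (hp : '=' ∈ p.toList) (hk : '=' ∉ key.toList) :
    PySem.Str.startswith p (key ++ "=") = true ↔ p.toList.takeWhile (· ≠ '=') = key.toList := by
  rw [PySem.Str.startswith_eq, PySem.Chars.startswith_iff, String.toList_append]
  exact pv_prefix_iff_takeWhile _ _ hp hk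

theorem pv_sw_false (p key : String) (hp : '=' ∉ p.toList) :
    PySem.Str.startswith p (key ++ "=") = false := by
  by_contra h
  simp only [Bool.not_eq_false] at h
  exact hp (pv_startswith_mem p (key ++ "=") h (by simp [String.toList_append]))

-- split("=", 1) on a part that contains '=', at the String level
theorem pv_splitMax_str (p : String) (hp : '=' ∈ p.toList) :
    PySem.Str.splitMax? p "=" 1 =
      some [String.ofList (p.toList.takeWhile (· ≠ '=')), pvVal p] := by
  rw [PySem.Str.splitMax?, PySem.Chars.splitMax?]
  simp only [show ("=".toList.isEmpty) = false from rfl, Bool.false_eq_true, if_false]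
  rw [show ("=".toList) = ['='] from rfl, pv_split1_mem p.toList hp]
  rfl

-- B's dict, looked up at a '='-free key, is the first part starting with key ++ "="
theorem pv_build_get (key : String) (hk : '=' ∉ key.toList) (parts : List String) :
    ∀ d : PySem.Dict String String,
      (parts.foldl pvInsertPart d).get? key =
        (d.get? key).or
          ((parts.find? (fun p => PySem.Str.startswith p (key ++ "="))).map pvVal) := by
  induction parts with
  | nil => intro d; simp
  | cons p rest ih =>
    intro d
    rw [List.foldl_cons, List.find?]
    by_cases hin : PySem.Str.isIn "=" p = true
    · have hp : '=' ∈ p.toList := by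
        have h1 := (PySem.Str.isIn_iff_infix "=" p).mp hin
        rw [show ("=".toList) = ['='] from rfl] at h1
        exact (List.singleton_infix_iff '=' p.toList).mp h1
      rw [pvInsertPart]
      simp only [hin, if_pos]
      rw [pv_splitMax_str p hp]
      by_cases hkey : String.ofList (p.toList.takeWhile (· ≠ '=')) = key
      · have htw : p.toList.takeWhile (· ≠ '=') = key.toList := by
          rw [← hkey, String.toList_ofList]
        have hsw := (pv_sw_iff p key hp hk).mpr htw
        simp only [hsw]
        cases hq : d.get? key with
        | some w =>
          have hc : d.contains (String.ofList (p.toList.takeWhile (· ≠ '='))) = true := by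
            rw [hkey, PySem.Dict.contains_eq_isSome_get?, hq]; rfl
          simp only [hc, if_pos]
          rw [ih d, hq]
          rfl
        | none =>
          have hc : d.contains (String.ofList (p.toList.takeWhile (· ≠ '='))) = false := by
            rw [hkey, PySem.Dict.contains_eq_isSome_get?, hq]; rfl
          simp only [hc, Bool.false_eq_true, if_false]
          rw [ih, hkey, PySem.Dict.get?_insert_self]
          simp
      · have hsw : PySem.Str.startswith p (key ++ "=") = false := by
          by_contra h
          simp only [Bool.not_eq_false] at h
          exact hkey (by rw [(pv_sw_iff p key hp hk).mp h, String.ofList_toList])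
        simp only [hsw]
        by_cases hc : d.contains (String.ofList (p.toList.takeWhile (· ≠ '='))) = true
        · simp only [hc, if_pos]; exact ih d
        · simp only [Bool.not_eq_true] at hc
          simp only [hc, Bool.false_eq_true, if_false]
          rw [ih, PySem.Dict.get?_insert_of_ne _ _ (fun e => hkey e.symm)]
    · simp only [Bool.not_eq_true] at hin
      have hp : '=' ∉ p.toList := by
        intro hmem
        rw [(PySem.Str.isIn_iff_infix "=" p).mpr
          (by rw [show ("=".toList) = ['='] from rfl]
              exact (List.singleton_infix_iff '=' p.toList).mpr hmem)] at hin
        exact Bool.true_eq_false.mp hin -- contradiction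
      rw [pvInsertPart]
      simp only [hin, Bool.false_eq_true, if_false]
      simp only [pv_sw_false p key hp]
      exact ih d

-- the split parts, written as the underlying char-level split
theorem pv_splitBar_eq (comment : String) :
    pvSplitBar comment = (PySem.Chars.splitOn comment.toList ['|']).map String.ofList := by
  rw [pvSplitBar, PySem.Str.split?, PySem.Chars.split?]
  rfl

-- a matching part found among the split parts forces A's substring guard to be true
theorem pv_guard (comment key : String) (p : String)
    (hfind : (pvSplitBar comment).find? (fun q => PySem.Str.startswith q (key ++ "=")) = some p) :
    PySem.Str.isIn (key ++ "=") comment = true := by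
  have hmem := List.mem_of_find?_eq_some hfind
  have hpred := List.find?_some hfind
  rw [pv_splitBar_eq] at hmem
  obtain ⟨pc, hpc, rfl⟩ := List.mem_map.mp hmem
  have hinf := pv_mem_splitOn_infix _ _ _ hpc
  rw [PySem.Str.isIn_iff_infix]
  have hpre : (key ++ "=").toList <+: pc := by
    have h1 := (PySem.Chars.startswith_iff (String.ofList pc).toList (key ++ "=").toList).mp
      (by rw [← PySem.Str.startswith_eq]; exact hpred)
    simpa [String.toList_ofList] using h1
  exact hpre.isInfix.trans hinf

-- A's returned value on the first matching part equals B's (strip of the stored value)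
theorem pv_value_eq (p : String) (hp : '=' ∈ p.toList) :
    (match (PySem.Str.splitMax? p "=" 1).bind
        (fun pieces => PySem.List.pyGet? pieces 1) with
     | some v => if PySem.Str.strip v = "" then none else some (PySem.Str.strip v)
     | none => none) =
    (if PySem.Str.strip (pvVal p) = "" then none
     else some (PySem.Str.strip (pvVal p))) := by
  rw [pv_splitMax_str p hp]
  rfl

-- per-key stage: A's guarded scan, as a function of the first matching part
theorem pv_stage (comment key : String) :
    (if PySem.Str.isIn (key ++ "=") comment = true
     then pvScanA (key ++ "=") (pvSplitBar comment) else none) =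
      ((pvSplitBar comment).find? (fun p => PySem.Str.startswith p (key ++ "="))).map
        (fun p => if PySem.Str.strip (pvVal p) = "" then none
                  else some (PySem.Str.strip (pvVal p))) := by
  cases hfind : (pvSplitBar comment).find? (fun p => PySem.Str.startswith p (key ++ "=")) with
  | none =>
    by_cases h : PySem.Str.isIn (key ++ "=") comment = true
    · rw [if_pos h, pv_scanA_eq, hfind]; simp only [Option.map_none]
    · rw [if_neg h]; simp only [Option.map_none]
  | some p =>
    have hpred : PySem.Str.startswith p (key ++ "=") = true := by
      simpa using List.find?_some hfind
    have hp : '=' ∈ p.toList :=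
      pv_startswith_mem p (key ++ "=") hpred (by simp [String.toList_append])
    rw [if_pos (pv_guard comment key p hfind), pv_scanA_eq, hfind]
    simp only [Option.map_some]
    rw [pv_value_eq p hp]

-- B's dict lookups, with the empty initial dict discharged
theorem pv_get_eq (comment key : String) (hk : '=' ∉ key.toList) :
    ((pvSplitBar comment).foldl pvInsertPart PySem.Dict.empty).get? key =
      ((pvSplitBar comment).find? (fun p => PySem.Str.startswith p (key ++ "="))).map pvVal := by
  rw [pv_build_get key hk _ PySem.Dict.empty, PySem.Dict.get?_empty]
  rfl

-- ===== VERDICT (by name: the statement is the Claim_ definition above) =====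
theorem parse_comment_strategy_py_spec : Claim_equal_parse_comment_strategy_py := by
  intro comment _
  show parse_comment_strategy_py comment = parse_comment_strategy_py_alt comment
  by_cases h0 : comment = ""
  · subst h0; rfl
  · rw [parse_comment_strategy_py, if_neg h0, parse_comment_strategy_py_alt,
      pvLookup]
    have hs := pv_get_eq comment "strategy" (by decide)
    have he := pv_get_eq comment "EDGE" (by decide)
    rw [show ("strategy=" : String) = "strategy" ++ "=" from by decide,
      show ("EDGE=" : String) = "EDGE" ++ "=" from by decide,
      pv_stage comment "strategy", pv_stage comment "EDGE", hs]
    cases (pvSplitBar comment).find? (fun p => PySem.Str.startswith p ("strategy" ++ "=")) with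
    | some p => rfl
    | none =>
      simp only [Option.map_none]
      rw [pvLookup, he]
      cases (pvSplitBar comment).find? (fun p => PySem.Str.startswith p ("EDGE" ++ "=")) with
      | some p => rfl
      | none => rfl
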